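-- pv_equiv track=rewrite | github.com/SeungBJun/UnWordle | unwordle.py | select_word
-- ===== SOURCE A (Python) =====
-- def select_word(words):
--     unique = True
--     tmp = []
--     for word in words:
--         for i in range(len(word)):
--             for j in range(i + 1, len(word)):
--                 if word[i] == word[j]:
--                     unique = False
--         if unique:
--             tmp.append(word)
--         unique = True
--     if len(tmp) > 0:
--         return tmp[0]
--     else:
--         return words[0]
-- ===== SOURCE B (Python) =====
-- def select_word(words):
--     for word in words:
--         s = sorted(word)
--         if all(s[i] != s[i + 1] for i in range(len(s) - 1)):
--             return word
--     return words[0]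
-- ===== Notes on version B (the rewrite author's own statement) =====
-- stated objective: faster
-- what changed: Replaces A's collect-all-into-tmp with nested O(L^2) pairwise letter comparison by an early-returning scan that detects duplicate letters via sort-then-adjacent-pair check per word.
import Mathlib
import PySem

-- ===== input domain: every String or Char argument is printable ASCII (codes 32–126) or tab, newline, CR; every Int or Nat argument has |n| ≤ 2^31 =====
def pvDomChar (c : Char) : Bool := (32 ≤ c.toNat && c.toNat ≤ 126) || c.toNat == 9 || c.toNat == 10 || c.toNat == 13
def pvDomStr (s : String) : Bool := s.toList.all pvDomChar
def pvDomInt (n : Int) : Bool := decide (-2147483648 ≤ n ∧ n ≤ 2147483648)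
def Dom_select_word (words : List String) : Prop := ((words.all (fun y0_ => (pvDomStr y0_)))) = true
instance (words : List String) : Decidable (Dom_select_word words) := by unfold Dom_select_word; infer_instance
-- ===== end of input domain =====

-- B changes the algorithm: instead of A's tmp-list with nested pairwise comparison,
-- scan words once and test duplicate letters by sorting and checking adjacent pairs. (faster in a timing run? stated in claim)

-- ===== PORT A =====
-- inner nested loops of A: 'unique' flag over all index pairs i < j of the word
def pyUnique (w : List Char) : Bool :=
  (List.range w.length).foldl (fun u i =>
    (List.range' (i+1) (w.length - (i+1))).foldl (fun u j =>
      if w.getD i ' ' = w.getD j ' ' then false else u) u) true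

def select_word (words : List String) : String :=
  let tmp := words.foldl (fun tmp word =>
    if pyUnique word.toList then tmp ++ [word] else tmp) []
  if tmp.length > 0 then tmp.getD 0 "" else words.getD 0 ""

-- ===== PORT B =====
-- all(s[i] != s[i+1] for i in range(len(s)-1)): no adjacent equal pair
def noAdjDup : List Char → Bool
  | a :: b :: rest => if a = b then false else noAdjDup (b :: rest)
  | _ => true

def select_word_alt (words : List String) : String :=
  match words.find? (fun w => noAdjDup (PySem.List.sorted w.toList (fun c => c) false)) with
  | some w => w
  | none => words.getD 0 ""

-- ===== PRECONDITION & SPEC =====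
-- A raises IndexError (words[0]) exactly when words is empty; excluded.
def Pre_select_word (words : List String) : Prop := words ≠ []
instance (words : List String) : Decidable (Pre_select_word words) := by unfold Pre_select_word; infer_instance
def pvWitness_select_word : List String := ["aba", "xyz"]

def Spec_select_word (words : List String) (out : String) : Prop := out = select_word_alt words
instance (words : List String) (out : String) : Decidable (Spec_select_word words out) := by unfold Spec_select_word; infer_instance

-- ===== CLAIM (what is proved, stated in full; the proofs are below) =====
def Claim_equal_select_word : Prop := ∀ (words : List String), Dom_select_word words → Pre_select_word words → Spec_select_word words (select_word words)

-- ===== LEMMAS AND PROOFS =====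

theorem foldl_and {α : Type} (g : α → Bool) :
    ∀ (l : List α) (u : Bool), l.foldl (fun u x => u && g x) u = (u && l.all g) := by
  intro l; induction l with
  | nil => simp
  | cons a t ih => intro u; simp [List.foldl, ih, Bool.and_assoc]

theorem if_false_eq_and (c : Prop) [Decidable c] (u : Bool) :
    (if c then false else u) = (u && !(decide c)) := by
  by_cases h : c <;> simp [h]

theorem pyUnique_eq_true_iff (w : List Char) : pyUnique w = true ↔ w.Nodup := by
  unfold pyUnique
  have hinner : ∀ i u, (List.range' (i+1) (w.length - (i+1))).foldl
      (fun u j => if w.getD i ' ' = w.getD j ' ' then false else u) u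
      = (u && (List.range' (i+1) (w.length - (i+1))).all (fun j => !(decide (w.getD i ' ' = w.getD j ' ')))) := by
    intro i u
    have := foldl_and (fun j => !(decide (w.getD i ' ' = w.getD j ' ')))
      (List.range' (i+1) (w.length - (i+1))) u
    rw [← this]
    congr 1
    funext u j
    exact if_false_eq_and _ _
  have houter : (List.range w.length).foldl (fun u i =>
      (List.range' (i+1) (w.length - (i+1))).foldl
        (fun u j => if w.getD i ' ' = w.getD j ' ' then false else u) u) true
      = (List.range w.length).all (fun i => (List.range' (i+1) (w.length - (i+1))).all
          (fun j => !(decide (w.getD i ' ' = w.getD j ' ')))) := by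
    have := foldl_and (fun i => (List.range' (i+1) (w.length - (i+1))).all
          (fun j => !(decide (w.getD i ' ' = w.getD j ' ')))) (List.range w.length) true
    simp only [Bool.true_and] at this
    rw [← this]
    congr 1
    funext u i
    exact hinner i u
  rw [houter]
  simp only [List.all_eq_true, List.mem_range, List.mem_range'_1, Bool.not_eq_eq_eq_not,
    Bool.not_true, decide_eq_false_iff_not]
  rw [List.nodup_iff_getElem?_ne_getElem?]
  constructor
  · intro h i j hij hj
    have hi : i < w.length := Nat.lt_trans hij hj
    have := h i hi j ⟨hij, by omega⟩
    rw [List.getD_eq_getElem w ' ' hi, List.getD_eq_getElem w ' ' hj] at this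
    simp [hi, hj]
    exact this
  · intro h i hi j ⟨hij, hj⟩
    have hj' : j < w.length := by omega
    have := h i j (by omega) hj'
    simp [hi, hj'] at this
    rw [List.getD_eq_getElem w ' ' hi, List.getD_eq_getElem w ' ' hj']
    exact this

theorem noAdjDup_eq_true_iff (l : List Char) : noAdjDup l = true ↔ l.IsChain (· ≠ ·) := by
  induction l with
  | nil => simp [noAdjDup, List.IsChain.nil]
  | cons a t ih =>
    cases t with
    | nil => simp [noAdjDup]
    | cons b r =>
      by_cases h : a = b
      · simp [noAdjDup, h]
      · simp [noAdjDup, h, ih, List.isChain_cons_cons]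

theorem pairwise_lt_of_le_noAdj (l : List Char) (hs : l.Pairwise (· ≤ ·))
    (h : l.IsChain (· ≠ ·)) : l.Pairwise (· < ·) := by
  induction l with
  | nil => exact List.Pairwise.nil
  | cons a t ih =>
    rcases List.pairwise_cons.mp hs with ⟨ha, ht⟩
    have hc := List.isChain_cons.mp h
    have htp : t.Pairwise (· < ·) := ih ht hc.2
    refine List.pairwise_cons.mpr ⟨?_, htp⟩
    intro x hx
    cases t with
    | nil => cases hx
    | cons b r =>
      have hab : a < b := lt_of_le_of_ne (ha b (List.mem_cons_self)) (hc.1 b rfl)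
      rcases List.mem_cons.mp hx with rfl | hxr
      · exact hab
      · exact lt_trans hab ((List.pairwise_cons.mp htp).1 x hxr)

-- the two per-word tests agree: both decide "all letters distinct"
theorem test_eq (s : String) :
    pyUnique s.toList = noAdjDup (PySem.List.sorted s.toList (fun c => c) false) := by
  rw [Bool.eq_iff_iff, pyUnique_eq_true_iff, noAdjDup_eq_true_iff]
  have hperm : (PySem.List.sorted s.toList (fun c => c) false).Perm s.toList :=
    PySem.List.sorted_perm _ _ _
  have hle : (PySem.List.sorted s.toList (fun c => c) false).Pairwise (· ≤ ·) := by
    have := PySem.List.sorted_pairwise s.toList (fun c => c)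
    simpa using this
  constructor
  · intro hnd
    have : (PySem.List.sorted s.toList (fun c => c) false).Nodup := hperm.nodup_iff.mpr hnd
    have hlt : (PySem.List.sorted s.toList (fun c => c) false).Pairwise (· < ·) :=
      (hle.and this).imp (fun ⟨h1, h2⟩ => lt_of_le_of_ne h1 h2)
    exact (hlt.imp (fun h => ne_of_lt h)).isChain
  · intro hch
    have hlt := pairwise_lt_of_le_noAdj _ hle hch
    exact hperm.nodup_iff.mp (hlt.imp (fun h => ne_of_lt h))

theorem foldl_append_filter (p : String → Bool) :
    ∀ (l : List String) (acc : List String),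
      l.foldl (fun tmp word => if p word then tmp ++ [word] else tmp) acc = acc ++ l.filter p := by
  intro l; induction l with
  | nil => simp
  | cons a t ih =>
    intro acc
    by_cases h : p a <;> simp [List.foldl, h, ih]

theorem filter_head_eq_find (p : String → Bool) :
    ∀ (l : List String),
      (if (l.filter p).length > 0 then (l.filter p).getD 0 "" else l.getD 0 "") =
      (match l.find? p with | some w => w | none => l.getD 0 "") := by
  intro l; induction l with
  | nil => simp
  | cons w t ih =>
    by_cases h : p w
    · simp [List.find?, h]
    · simp only [List.filter_cons, h, if_false, List.find?, Bool.false_eq_true]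
      cases hf : t.find? p with
      | some x =>
        have hx : x ∈ t := List.mem_of_find?_eq_some hf
        have hpx : p x = true := List.find?_some hf
        have hmem : x ∈ t.filter p := List.mem_filter.mpr ⟨hx, hpx⟩
        have hlen : (t.filter p).length > 0 := List.length_pos_of_mem hmem
        rw [hf] at ih
        simp only [hlen, if_true] at ih ⊢
        simpa using ih
      | none =>
        have : t.filter p = [] := by
          rw [List.filter_eq_nil_iff]
          intro a ha
          exact (List.find?_eq_none.mp hf) a ha
        simp [this]

theorem select_eq (words : List String) :
    select_word words = select_word_alt words := by
  unfold select_word select_word_alt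
  rw [foldl_append_filter]
  simp only [List.nil_append]
  have hp : (fun w : String => noAdjDup (PySem.List.sorted w.toList (fun c => c) false))
      = (fun w : String => pyUnique w.toList) := funext fun s => (test_eq s).symm
  rw [hp]
  exact filter_head_eq_find (fun w => pyUnique w.toList) words

-- ===== VERDICT (by name: the statement is the Claim_ definition above) =====
theorem select_word_spec : Claim_equal_select_word := by
  intro words _ _
  exact select_eq words
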